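-- pv_equiv track=rewrite | github.com/salee1023/TIL | 3.Algorithm/08. kakao/no1.py | solution
-- ===== SOURCE A (Python) =====
-- def solution(new_id):
--     answer = ''
--     first, second, third, forth = '', '', '', ''
--     # 1st step
--     first = new_id.lower()
--     # 2nd step
--     for n in first:
--         x = ord(n)
--         if 45 <= x <= 46 or 48 <= x <= 57 or x == 95 or 97 <= x <= 122:
--             second += n
--     # 3rd step
--     if len(second) <= 1:
--         third = second
--     else:
--         for i in range(len(second)-1):
--             if second[i] != '.':
--                 third += second[i]
--             else:
--                 if second[i+1] != '.':
--                     third += second[i]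
--         if second[-1] != '.':
--             third += second[-1]
--     # 4th step
--     temp = []
--     temp.extend(third)
--     if len(temp) == 0:
--         forth = ''.join(temp)
--     else:
--         if temp[0] == '.':
--             temp.pop(0)
--         elif temp[-1] == '.':
--             temp.pop(-1)
--         forth = ''.join(temp)
--     # 5th step, 6th step
--     if len(forth) == 0:
--         forth += 'a'
--     elif len(forth) >= 16:
--         forth = forth[:15]
--         if forth[-1] == '.':
--             forth = forth[:14]
--     # 7th step
--     if len(forth) <= 2:
--         while len(forth) != 3:
--             forth += forth[-1]
--     answer = forth
--     return answer
-- ===== SOURCE B (Python) =====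
-- import re
--
-- def solution(new_id):
--     s = new_id.lower()
--     s = re.sub(r'[^a-z0-9._-]', '', s)
--     s = re.sub(r'\.+', '.', s)
--     s = s.strip('.')
--     if not s:
--         s = 'a'
--     if len(s) >= 16:
--         s = s[:15]
--         if s[-1] == '.':
--             s = s[:14]
--     return s + s[-1] * (3 - len(s))
-- ===== Notes on version B (the rewrite author's own statement) =====
-- stated objective: idiomatic
-- what changed: B replaces A's character-by-character accumulation loops, index-based dot-collapse loop over range(len-1), temp-list pops and the padding while-loop with two regex substitutions (re.sub), a single strip('.'), slicing and arithmetic string repetition.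
import Mathlib
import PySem

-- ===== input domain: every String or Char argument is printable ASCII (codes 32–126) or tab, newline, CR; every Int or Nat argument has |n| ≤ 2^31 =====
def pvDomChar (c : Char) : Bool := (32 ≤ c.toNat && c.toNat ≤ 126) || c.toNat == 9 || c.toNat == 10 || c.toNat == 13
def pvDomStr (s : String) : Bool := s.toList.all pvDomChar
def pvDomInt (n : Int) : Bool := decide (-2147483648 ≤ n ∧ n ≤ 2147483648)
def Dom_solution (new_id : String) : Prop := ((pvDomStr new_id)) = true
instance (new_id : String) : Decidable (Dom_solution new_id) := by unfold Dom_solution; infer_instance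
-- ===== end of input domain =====

-- B rewrites A's char-accumulation loops, index-based dot-collapse, list pops and padding
-- while-loop as regex-style filter/collapse, strip('.'), slicing and string repetition (idiomatic).

-- ===== PORT A =====

-- the step-7 'while len(forth) != 3: forth += forth[-1]' loop; fuel only makes it total
-- (with the guard len ≤ 2 under which A runs it, 3 - len iterations reach length 3 exactly)
def pvWhileAppend (fuel : Nat) (l : List Char) : List Char :=
  match fuel with
  | 0 => l
  | f + 1 => if l.length ≠ 3 then pvWhileAppend f (l ++ [l.getLast?.getD ' ']) else l

def solution (new_id : String) : String :=
  -- 1st step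
  let first := (PySem.Str.lower new_id).toList
  -- 2nd step
  let second := first.foldl (fun acc n =>
      let x := n.toNat
      if (45 ≤ x ∧ x ≤ 46) ∨ (48 ≤ x ∧ x ≤ 57) ∨ x = 95 ∨ (97 ≤ x ∧ x ≤ 122)
      then acc ++ [n] else acc) []
  -- 3rd step
  let third :=
    if second.length ≤ 1 then second
    else
      (PySem.List.pyRange 0 ((second.length : Int) - 1) 1).foldl (fun acc i =>
          if PySem.List.pyGetD second i ' ' ≠ '.' then acc ++ [PySem.List.pyGetD second i ' ']
          else if PySem.List.pyGetD second (i + 1) ' ' ≠ '.' then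
            acc ++ [PySem.List.pyGetD second i ' ']
          else acc) []
        ++ (if PySem.List.pyGetD second (-1) ' ' ≠ '.' then [PySem.List.pyGetD second (-1) ' ']
            else [])
  -- 4th step (temp.pop(0) on a nonempty list is .tail, temp.pop(-1) is .dropLast: exact here)
  let temp := third
  let forth :=
    if temp.length = 0 then temp
    else if PySem.List.pyGetD temp 0 ' ' = '.' then temp.tail
    else if PySem.List.pyGetD temp (-1) ' ' = '.' then temp.dropLast
    else temp
  -- 5th and 6th step
  let forth2 :=
    if forth.length = 0 then forth ++ ['a']
    else if 16 ≤ forth.length then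
      let f := PySem.List.slice forth none (some 15)
      if PySem.List.pyGetD f (-1) ' ' = '.' then PySem.List.slice f none (some 14) else f
    else forth
  -- 7th step
  let answer := if forth2.length ≤ 2 then pvWhileAppend (3 - forth2.length) forth2 else forth2
  String.ofList answer

-- ===== PORT B =====

-- the character class [a-z0-9._-] of B's first re.sub (codes, matching the regex)
def pvKeep (c : Char) : Bool :=
  (97 ≤ c.toNat && c.toNat ≤ 122) || (48 ≤ c.toNat && c.toNat ≤ 57) ||
    c.toNat == 46 || c.toNat == 95 || c.toNat == 45

-- re.sub(r'\.+', '.', s): collapse every run of dots to a single dot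
def pvCollapse : List Char → List Char
  | [] => []
  | [a] => [a]
  | a :: b :: t => if a = '.' ∧ b = '.' then pvCollapse (b :: t) else a :: pvCollapse (b :: t)

def solution_alt (new_id : String) : String :=
  let s1 := (PySem.Str.lower new_id).toList
  let s2 := s1.filter pvKeep
  let s3 := pvCollapse s2
  let s4 := PySem.Chars.stripChars s3 ['.']
  let s5 := if s4 = [] then ['a'] else s4
  let s6 :=
    if 16 ≤ s5.length then
      let t := s5.take 15
      if t.getLast?.getD ' ' = '.' then t.take 14 else t
    else s5
  -- s + s[-1] * (3 - len(s)): s6 is nonempty here, and a Python negative repeat is ''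
  String.ofList (s6 ++ List.replicate (3 - s6.length) (s6.getLast?.getD ' '))

-- ===== PRECONDITION & SPEC =====
def Spec_solution (new_id : String) (out : String) : Prop := out = solution_alt new_id
instance (new_id : String) (out : String) : Decidable (Spec_solution new_id out) := by
  unfold Spec_solution; infer_instance

-- ===== CLAIM (what is proved, stated in full; the proofs are below) =====
def Claim_equal_solution : Prop := ∀ (new_id : String), Dom_solution new_id → Spec_solution new_id (solution new_id)

-- ===== LEMMAS AND PROOFS =====


-- strip helpers used only by the proofs
def pvStripL (l : List Char) : List Char := l.dropWhile (· == '.')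
def pvStripT (l : List Char) : List Char := (l.reverse.dropWhile (· == '.')).reverse

-- what A's step-3 index loop keeps for each adjacent pair, structurally
def pvPairKeep : List Char → List Char
  | [] => []
  | [_] => []
  | a :: b :: t => (if a ≠ '.' then [a] else if b ≠ '.' then [a] else []) ++ pvPairKeep (b :: t)

def pvLastKeep (l : List Char) : List Char :=
  if h : l = [] then [] else if l.getLast h ≠ '.' then [l.getLast h] else []

lemma pvStep2_eq (l : List Char) :
    l.foldl (fun acc n =>
      let x := n.toNat
      if (45 ≤ x ∧ x ≤ 46) ∨ (48 ≤ x ∧ x ≤ 57) ∨ x = 95 ∨ (97 ≤ x ∧ x ≤ 122)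
      then acc ++ [n] else acc) [] = l.filter pvKeep := by
  rw [PySem.List.foldl_append_ite_eq_filter]
  rw [List.nil_append]
  apply List.filter_congr
  intro c _
  simp only [pvKeep]
  rw [Bool.eq_iff_iff]
  simp only [decide_eq_true_eq, Bool.or_eq_true, Bool.and_eq_true, decide_eq_true_eq,
    beq_iff_eq]
  omega

lemma pvStripChars_eq (l : List Char) :
    PySem.Chars.stripChars l ['.'] = pvStripT (pvStripL l) := by
  simp only [PySem.Chars.stripChars, pvStripT, pvStripL]
  simp only [List.contains_cons, List.contains_nil, Bool.or_false]

lemma pvStripT_cons (a : Char) (l : List Char) :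
    pvStripT (a :: l) =
      if pvStripT l = [] then (if a = '.' then [] else [a]) else a :: pvStripT l := by
  simp only [pvStripT, List.reverse_cons, List.dropWhile_append]
  by_cases h : (l.reverse.dropWhile (· == '.')) = []
  · simp [h]; by_cases ha : a = '.' <;> simp [ha]
  · simp [h, List.isEmpty_iff]

lemma pvStripT_cons_ne (a : Char) (l : List Char) (h : a ≠ '.') : pvStripT (a :: l) ≠ [] := by
  simp only [pvStripT, List.reverse_cons, List.dropWhile_append]
  by_cases hl : (l.reverse.dropWhile (· == '.')) = [] <;>
    simp [hl, List.isEmpty_iff, h]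

lemma pvStripT_getLast (l : List Char) (h : pvStripT l ≠ []) : (pvStripT l).getLast h ≠ '.' := by
  have h2 : (l.reverse.dropWhile (· == '.')) ≠ [] := by
    intro hc; exact h (by simp [pvStripT, hc])
  have := List.head_dropWhile_not (p := (· == '.')) (l := l.reverse) h2
  simpa [pvStripT, List.getLast_reverse] using this

lemma pvStripT_eq_nil_iff (l : List Char) : pvStripT l = [] ↔ ∀ x ∈ l, x = '.' := by
  simp [pvStripT, List.dropWhile_eq_nil_iff]

lemma pvStripL_eq_nil (l : List Char) (h : ∀ x ∈ l, x = '.') : pvStripL l = [] := by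
  simp [pvStripL, List.dropWhile_eq_nil_iff]
  intro x hx; simp [h x hx]

lemma pvStripT_prefix (l : List Char) : pvStripT l <+: l := by
  have := List.dropWhile_suffix (l := l.reverse) (p := (· == '.'))
  have h2 := this.reverse
  simpa [pvStripT] using h2

lemma pvCollapse_cons (a : Char) (l : List Char) : ∃ s, pvCollapse (a :: l) = a :: s := by
  induction l generalizing a with
  | nil => exact ⟨[], rfl⟩
  | cons b t ih =>
    obtain ⟨s, hs⟩ := ih b
    by_cases h : a = '.' ∧ b = '.'
    · obtain ⟨ha, hb⟩ := h; subst ha; subst hb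
      exact ⟨s, by simpa [pvCollapse] using hs⟩
    · exact ⟨pvCollapse (b :: t), by simp [pvCollapse, h]⟩

lemma pvCollapse_dot_cons (l r : List Char) (h : pvCollapse l = '.' :: r) :
    r = [] ∨ ∃ y t, r = y :: t ∧ y ≠ '.' := by
  induction l generalizing r with
  | nil => simp [pvCollapse] at h
  | cons a t ih =>
    rcases t with _ | ⟨b, u⟩
    · simp [pvCollapse] at h
      exact Or.inl h.2
    · by_cases hab : a = '.' ∧ b = '.'
      · rw [show pvCollapse (a :: b :: u) = pvCollapse (b :: u) by simp [pvCollapse, hab]] at h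
        exact ih r h
      · rw [show pvCollapse (a :: b :: u) = a :: pvCollapse (b :: u) by simp [pvCollapse, hab]] at h
        obtain ⟨ha, hr⟩ := List.cons.inj h
        obtain ⟨s, hs⟩ := pvCollapse_cons b u
        subst ha
        rw [hs] at hr
        exact Or.inr ⟨b, s, hr.symm, fun hb => hab ⟨rfl, hb⟩⟩

-- A's step-3 output equals trailing-dot-stripped collapse (key lemma)
lemma pvPairKeep_last (l : List Char) (h : l ≠ []) :
    pvPairKeep l ++ pvLastKeep l = pvStripT (pvCollapse l) := by
  induction l with
  | nil => exact absurd rfl h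
  | cons a t ih =>
    rcases t with _ | ⟨b, u⟩
    · simp only [pvPairKeep, pvLastKeep, pvCollapse, pvStripT]
      by_cases ha : a = '.' <;> simp [ha]
    · have hbt : pvPairKeep (b :: u) ++ pvLastKeep (b :: u) = pvStripT (pvCollapse (b :: u)) :=
        ih (by simp)
      have hlast : pvLastKeep (a :: b :: u) = pvLastKeep (b :: u) := by
        simp [pvLastKeep, List.getLast_cons]
      obtain ⟨s, hs⟩ := pvCollapse_cons b u
      by_cases hab : a = '.' ∧ b = '.'
      · have h1 : pvPairKeep (a :: b :: u) = pvPairKeep (b :: u) := by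
          simp [pvPairKeep, hab.1, hab.2]
        have h2 : pvCollapse (a :: b :: u) = pvCollapse (b :: u) := by
          simp [pvCollapse, hab]
        rw [h1, hlast, h2, hbt]
      · have h2 : pvCollapse (a :: b :: u) = a :: pvCollapse (b :: u) := by
          simp [pvCollapse, hab]
        rw [h2, pvStripT_cons]
        by_cases ha : a = '.'
        · have hb : b ≠ '.' := fun hb => hab ⟨ha, hb⟩
          have hne : pvStripT (pvCollapse (b :: u)) ≠ [] := by
            rw [hs]; exact pvStripT_cons_ne b s hb
          have h1 : pvPairKeep (a :: b :: u) = [a] ++ pvPairKeep (b :: u) := by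
            simp [pvPairKeep, ha, hb]
          rw [h1, hlast, if_neg hne, List.append_assoc, hbt]
          rfl
        · have h1 : pvPairKeep (a :: b :: u) = [a] ++ pvPairKeep (b :: u) := by
            simp [pvPairKeep, ha]
          rw [h1, hlast, List.append_assoc, hbt]
          by_cases hne : pvStripT (pvCollapse (b :: u)) = [] <;> simp [hne, ha]

lemma pvFlatMap_eq (l : List Char) :
    (List.range (l.length - 1)).flatMap (fun k =>
        if l.getD k ' ' ≠ '.' then [l.getD k ' ']
        else if l.getD (k + 1) ' ' ≠ '.' then [l.getD k ' '] else []) = pvPairKeep l := by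
  induction l with
  | nil => simp [pvPairKeep]
  | cons a t ih =>
    rcases t with _ | ⟨b, u⟩
    · simp [pvPairKeep]
    · have hlen : (a :: b :: u).length - 1 = (b :: u).length - 1 + 1 := by simp
      rw [hlen, List.range_succ_eq_map, List.flatMap_cons, List.flatMap_map]
      have hcong : ∀ k ∈ List.range ((b :: u).length - 1),
          (if (a :: b :: u).getD k.succ ' ' ≠ '.' then [(a :: b :: u).getD k.succ ' ']
           else if (a :: b :: u).getD (k.succ + 1) ' ' ≠ '.' then [(a :: b :: u).getD k.succ ' ']
           else []) =
          (if (b :: u).getD k ' ' ≠ '.' then [(b :: u).getD k ' ']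
           else if (b :: u).getD (k + 1) ' ' ≠ '.' then [(b :: u).getD k ' '] else []) := by
        intro k _; simp
      rw [List.flatMap_congr hcong, ih]
      simp only [pvPairKeep]
      congr 1

-- A's index loop computes pvPairKeep
lemma pvRangeFold_eq (l : List Char) :
    (PySem.List.pyRange 0 ((l.length : Int) - 1) 1).foldl (fun acc i =>
        if PySem.List.pyGetD l i ' ' ≠ '.' then acc ++ [PySem.List.pyGetD l i ' ']
        else if PySem.List.pyGetD l (i + 1) ' ' ≠ '.' then acc ++ [PySem.List.pyGetD l i ' ']
        else acc) [] = pvPairKeep l := by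
  have hbody : (fun (acc : List Char) (i : Int) =>
      if PySem.List.pyGetD l i ' ' ≠ '.' then acc ++ [PySem.List.pyGetD l i ' ']
      else if PySem.List.pyGetD l (i + 1) ' ' ≠ '.' then acc ++ [PySem.List.pyGetD l i ' ']
      else acc) = (fun acc i => acc ++
        (if PySem.List.pyGetD l i ' ' ≠ '.' then [PySem.List.pyGetD l i ' ']
         else if PySem.List.pyGetD l (i + 1) ' ' ≠ '.' then [PySem.List.pyGetD l i ' ']
         else [])) := by
    funext acc i; split_ifs <;> simp
  rw [hbody, PySem.List.foldl_append_eq_flatMap, PySem.List.pyRange_one, List.flatMap_map]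
  rw [← pvFlatMap_eq l]
  have hn : ((l.length : Int) - 1 - 0).toNat = l.length - 1 := by omega
  rw [hn]
  apply List.flatMap_congr
  intro k hk
  have hcast : ((0 : Int) + (k : Int)) = (k : Int) := by omega
  simp only [hcast, PySem.List.pyGetD_natCast]
  have : ((k : Int) + 1) = ((k + 1 : Nat) : Int) := by omega
  rw [this, PySem.List.pyGetD_natCast]

-- A's step 3 as stripped collapse
lemma pvThird_eq (m : List Char) :
    (if m.length ≤ 1 then m
     else
       (PySem.List.pyRange 0 ((m.length : Int) - 1) 1).foldl (fun acc i =>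
          if PySem.List.pyGetD m i ' ' ≠ '.' then acc ++ [PySem.List.pyGetD m i ' ']
          else if PySem.List.pyGetD m (i + 1) ' ' ≠ '.' then
            acc ++ [PySem.List.pyGetD m i ' ']
          else acc) []
        ++ (if PySem.List.pyGetD m (-1) ' ' ≠ '.' then [PySem.List.pyGetD m (-1) ' ']
            else [])) =
    if m = ['.'] then ['.'] else pvStripT (pvCollapse m) := by
  by_cases h1 : m.length ≤ 1
  · rw [if_pos h1]
    rcases m with _ | ⟨a, t⟩
    · simp [pvCollapse, pvStripT]
    · rcases t with _ | ⟨b, u⟩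
      · by_cases ha : a = '.'
        · simp [ha]
        · rw [if_neg (by simp [ha])]
          simp [pvCollapse, pvStripT, ha]
      · simp at h1
  · rw [if_neg h1]
    have hm : m ≠ [] := by intro h; subst h; simp at h1
    have hdot : m ≠ ['.'] := by intro h; subst h; simp at h1
    rw [if_neg hdot, pvRangeFold_eq]
    have hg : PySem.List.pyGetD m (-1) ' ' = m.getLast hm :=
      PySem.List.pyGetD_neg_one m ' ' hm
    rw [hg]
    rw [show (if m.getLast hm ≠ '.' then [m.getLast hm] else []) = pvLastKeep m from by
      simp [pvLastKeep, hm]]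
    exact pvPairKeep_last m hm

-- A's step 4 applied to step 3's output is strip('.') of the collapse
lemma pvForth_eq (m : List Char) :
    (let third := if m = ['.'] then ['.'] else pvStripT (pvCollapse m)
     if third.length = 0 then third
     else if PySem.List.pyGetD third 0 ' ' = '.' then third.tail
     else if PySem.List.pyGetD third (-1) ' ' = '.' then third.dropLast
     else third) = pvStripT (pvStripL (pvCollapse m)) := by
  simp only []
  by_cases hm : m = ['.']
  · subst hm
    simp [pvCollapse, pvStripL, pvStripT, PySem.List.pyGetD_zero_cons]
  · rw [if_neg hm]
    rcases hT : pvStripT (pvCollapse m) with _ | ⟨x, r⟩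
    · rw [if_pos (by simp)]
      have hall : ∀ c ∈ pvCollapse m, c = '.' := (pvStripT_eq_nil_iff _).1 hT
      rw [pvStripL_eq_nil _ hall]
      simp [pvStripT]
    · have hTne : (x :: r).length ≠ 0 := by simp
      rw [if_neg hTne]
      have hpre := pvStripT_prefix (pvCollapse m)
      rw [hT] at hpre
      obtain ⟨d, hC⟩ := hpre
      have hC' : pvCollapse m = x :: (r ++ d) := by rw [← hC]; simp
      rw [PySem.List.pyGetD_zero_cons]
      by_cases hx : x = '.'
      · rw [if_pos hx]
        subst hx
        rcases pvCollapse_dot_cons m (r ++ d) hC' with hnil | ⟨y, t, hyt, hy⟩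
        · rw [hnil] at hC'
          rw [hC'] at hT
          simp [pvStripT] at hT
        · rw [hyt] at hC'
          have hsl : pvStripL (pvCollapse m) = y :: t := by
            rw [hC']; simp [pvStripL, hy]
          rw [hsl]
          have := pvStripT_cons '.' (y :: t)
          rw [if_neg (pvStripT_cons_ne y t hy)] at this
          rw [hC'] at hT
          rw [this] at hT
          have := List.cons.inj hT
          simp [this.2]
      · rw [if_neg hx]
        have hlast : PySem.List.pyGetD (x :: r) (-1) ' ' = (x :: r).getLast (by simp) :=
          PySem.List.pyGetD_neg_one _ ' ' (by simp)
        have hne' : pvStripT (pvCollapse m) ≠ [] := by rw [hT]; simp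
        have h1 := pvStripT_getLast (pvCollapse m) hne'
        have e : (pvStripT (pvCollapse m)).getLast hne' = (x :: r).getLast (by simp) := by
          have h2 := List.getLast?_eq_some_getLast hne'
          have h3 := List.getLast?_eq_some_getLast (l := x :: r) (by simp)
          have h4 : (x :: r).getLast? = some ((pvStripT (pvCollapse m)).getLast hne') := by
            rw [← hT]; exact h2
          rw [h3] at h4
          exact (Option.some.inj h4).symm
        rw [e] at h1
        rw [hlast, if_neg h1]
        have hsl : pvStripL (pvCollapse m) = pvCollapse m := by
          rw [hC']; simp [pvStripL, hx]
        rw [hsl, hT]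

-- steps 5 and 6 agree
lemma pvStep56_eq (f : List Char) :
    (if f.length = 0 then f ++ ['a']
     else if 16 ≤ f.length then
       let t := PySem.List.slice f none (some 15)
       if PySem.List.pyGetD t (-1) ' ' = '.' then PySem.List.slice t none (some 14) else t
     else f) =
    (let s5 := if f = [] then ['a'] else f
     if 16 ≤ s5.length then
       let t := s5.take 15
       if t.getLast?.getD ' ' = '.' then t.take 14 else t
     else s5) := by
  by_cases hf : f = []
  · simp [hf]
  · have hlen : ¬ f.length = 0 := by simpa [List.length_eq_zero_iff] using hf
    by_cases h16 : 16 ≤ f.length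
    · simp only []
      simp only [if_neg hf, if_neg hlen, if_pos h16]
      have hs : PySem.List.slice f none (some 15) = f.take 15 := by
        rw [PySem.List.slice_to f (by norm_num)]; rfl
      rw [hs]
      have htne : f.take 15 ≠ [] := by
        simp [List.take_eq_nil_iff, hf]
      have hg : PySem.List.pyGetD (f.take 15) (-1) ' ' = (f.take 15).getLast?.getD ' ' := by
        rw [PySem.List.pyGetD_neg_one (f.take 15) ' ' htne,
            List.getLast?_eq_some_getLast htne]
        rfl
      rw [hg]
      split_ifs with hdot
      · rw [PySem.List.slice_to (f.take 15) (by norm_num)]; rfl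
      · rfl
    · simp [hf, hlen, h16]

-- step 7: the while-loop pads with copies of the last character
lemma pvPad_eq (l : List Char) (h : l ≠ []) :
    (if l.length ≤ 2 then pvWhileAppend (3 - l.length) l else l)
      = l ++ List.replicate (3 - l.length) (l.getLast?.getD ' ') := by
  rcases l with _ | ⟨a, t⟩
  · exact absurd rfl h
  rcases t with _ | ⟨b, u⟩
  · simp [pvWhileAppend]
  rcases u with _ | ⟨c, v⟩
  · simp [pvWhileAppend]
  · have h3 : ¬ (a :: b :: c :: v).length ≤ 2 := by simp
    have h0 : 3 - (a :: b :: c :: v).length = 0 := by simp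
    rw [if_neg h3, h0, List.replicate_zero, List.append_nil]

-- the list fed to step 7 is never empty
lemma pvStep56_ne_nil (f : List Char) :
    (let s5 := if f = [] then ['a'] else f
     if 16 ≤ s5.length then
       let t := s5.take 15
       if t.getLast?.getD ' ' = '.' then t.take 14 else t
     else s5) ≠ [] := by
  by_cases hf : f = []
  · simp [hf]
  · by_cases h16 : 16 ≤ f.length
    · simp only []
      simp only [if_neg hf, if_pos h16]
      split_ifs <;> simp [List.take_eq_nil_iff, hf]
    · simp [hf, h16]

-- ===== VERDICT (by name: the statement is the Claim_ definition above) =====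
theorem solution_spec : Claim_equal_solution := by
  intro new_id _
  unfold Spec_solution solution solution_alt
  simp only []
  rw [pvStep2_eq, pvStripChars_eq, pvThird_eq, pvForth_eq, pvStep56_eq]
  rw [pvPad_eq _ (pvStep56_ne_nil _)]
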